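-- pv_equiv track=rewrite | github.com/osipenkoav/python | l3-5.py | f_strprocess
-- ===== SOURCE A (Python) =====
-- def f_strprocess(s1):
--     list1 = s1.split()
--     res = 0  # результирующая сумма
--     flag = 0  # флаг выхода
--     for i in list1:
--         if i.isdigit():
--             res = res + int(i)
--         elif i == 'q':
--             flag = 1
--             break
--     return res, flag
-- ===== SOURCE B (Python) =====
-- def f_strprocess(s1):
--     words = s1.split()
--     if 'q' in words:
--         flag = 1
--         prefix = words[:words.index('q')]
--     else:
--         flag = 0
--         prefix = words
--     res = sum(int(i) for i in prefix if i.isdigit())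
--     return res, flag
-- ===== Notes on version B (the rewrite author's own statement) =====
-- stated objective: alternative
-- what changed: B first locates the cutoff (index of the first 'q', if any) to form a prefix, then sums the digit-words of that prefix in a separate pass, instead of A's single fold with early break and in-loop flag bookkeeping.
import Mathlib
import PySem

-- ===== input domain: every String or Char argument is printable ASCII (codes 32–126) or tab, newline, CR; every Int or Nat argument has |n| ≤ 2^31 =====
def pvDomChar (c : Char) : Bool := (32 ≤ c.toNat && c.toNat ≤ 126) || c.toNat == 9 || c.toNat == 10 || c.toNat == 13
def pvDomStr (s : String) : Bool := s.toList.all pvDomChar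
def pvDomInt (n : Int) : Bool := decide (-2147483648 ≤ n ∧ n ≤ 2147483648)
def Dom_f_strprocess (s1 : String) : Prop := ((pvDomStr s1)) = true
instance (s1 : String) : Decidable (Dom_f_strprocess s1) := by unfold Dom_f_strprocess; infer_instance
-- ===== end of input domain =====

-- B separates boundary-finding (index of first 'q') from digit-summing (one reduce pass over the prefix), instead of A's fused loop with early break; alternative decomposition, same cost.


-- ===== PORT A =====
-- the for-loop with early break; int(i) is ported as (ofStr? i).getD 0, exact here since
-- it is only reached when strIsdigit i (an all-digit ASCII word always parses)
def pvLoopA : List String → Int → Int × Int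
  | [], res => (res, 0)
  | i :: t, res =>
    if PySem.Str.strIsdigit i then pvLoopA t (res + (PySem.Int.ofStr? i).getD 0)
    else if i == "q" then (res, 1)
    else pvLoopA t res

def f_strprocess (s1 : String) : Int × Int := pvLoopA (PySem.Str.split₀ s1) 0

-- ===== PORT B =====
-- sum(int(i) for i in prefix if i.isdigit())
def pvSumDigits (l : List String) : Int :=
  ((l.filter (fun i => PySem.Str.strIsdigit i)).map (fun i => (PySem.Int.ofStr? i).getD 0)).sum

def f_strprocess_alt (s1 : String) : Int × Int :=
  let words := PySem.Str.split₀ s1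
  -- words[:words.index('q')] with the index known in range = take
  if words.contains "q" then
    (pvSumDigits (words.take ((PySem.List.index? words "q").getD 0)), 1)
  else
    (pvSumDigits words, 0)

-- ===== PRECONDITION & SPEC =====
def Spec_f_strprocess (s1 : String) (out : Int × Int) : Prop := out = f_strprocess_alt s1
instance (s1 : String) (out : Int × Int) : Decidable (Spec_f_strprocess s1 out) := by unfold Spec_f_strprocess; infer_instance

-- ===== CLAIM (what is proved, stated in full; the proofs are below) =====
def Claim_equal_f_strprocess : Prop := ∀ (s1 : String), Dom_f_strprocess s1 → Spec_f_strprocess s1 (f_strprocess s1)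

-- ===== LEMMAS AND PROOFS =====

lemma pvSumDigits_cons (i : String) (t : List String) :
    pvSumDigits (i :: t) =
      (if PySem.Str.strIsdigit i then (PySem.Int.ofStr? i).getD 0 else 0) + pvSumDigits t := by
  simp only [pvSumDigits, List.filter_cons]
  split_ifs <;> simp

lemma pvLoopA_eq (ws : List String) (res : Int) :
    pvLoopA ws res =
      if ws.contains "q" then
        (res + pvSumDigits (ws.take ((PySem.List.index? ws "q").getD 0)), 1)
      else
        (res + pvSumDigits ws, 0) := by
  induction ws generalizing res with
  | nil => simp [pvLoopA, pvSumDigits]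
  | cons i t ih =>
    by_cases hq : i = "q"
    · subst hq
      have hd : PySem.Str.strIsdigit "q" = false := by decide
      have hcon : (("q" :: t).contains "q") = true := by simp
      simp only [pvLoopA, hd, Bool.false_eq_true, if_false, BEq.rfl, if_true, hcon]
      rw [PySem.List.index?_cons_self]
      simp [pvSumDigits]
    · have hidx := PySem.List.index?_cons_of_ne (v := "q") (xs := t) hq
      have hb : (i == "q") = false := by simp [hq]
      by_cases hc : "q" ∈ t
      · obtain ⟨k, hk⟩ :=
          Option.isSome_iff_exists.mp ((PySem.List.index?_isSome_iff (xs := t) (v := "q")).2 hc)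
        have h1 : t.contains "q" = true := by simpa using hc
        have h2 : ((i :: t).contains "q") = true := by simp [hc]
        rw [if_pos h2, hidx, hk]
        cases hd : PySem.Str.strIsdigit i with
        | true =>
          simp only [pvLoopA, hd, if_true]
          rw [ih, if_pos h1, hk]
          simp only [Option.map_some, Option.getD_some, List.take_succ_cons,
            pvSumDigits_cons, hd, if_true, Prod.mk.injEq, and_true]
          ring
        | false =>
          have hd' : PySem.Chars.strIsdigit i.toList = false := by simpa using hd
          simp only [pvLoopA, hd, Bool.false_eq_true, if_false, hb]
          rw [ih, if_pos h1, hk]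
          simp [pvSumDigits_cons, hd', List.take_succ_cons]
      · rw [if_neg (by simp [Ne.symm hq, hc])]
        cases hd : PySem.Str.strIsdigit i with
        | true =>
          simp only [pvLoopA, hd, if_true]
          rw [ih, if_neg (by simp [hc])]
          simp only [pvSumDigits_cons, hd, if_true, Prod.mk.injEq, and_true]
          ring
        | false =>
          have hd' : PySem.Chars.strIsdigit i.toList = false := by simpa using hd
          simp only [pvLoopA, hd, Bool.false_eq_true, if_false, hb]
          rw [ih, if_neg (by simp [hc])]
          simp [pvSumDigits_cons, hd']

-- ===== VERDICT (by name: the statement is the Claim_ definition above) =====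
theorem f_strprocess_spec : Claim_equal_f_strprocess := by
  intro s1 _
  unfold Spec_f_strprocess f_strprocess f_strprocess_alt
  rw [pvLoopA_eq]
  by_cases hc : (PySem.Str.split₀ s1).contains "q" = true <;> simp only [hc, if_true, Bool.false_eq_true, if_false, zero_add]
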